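-- pv_equiv track=rewrite | github.com/brandoneng000/LeetCode | medium/2592.py | maximizeGreatness
-- ===== SOURCE A (Python) =====
-- from typing import List
--
-- def maximizeGreatness(nums: List[int]) -> int:
--     n = len(nums)
--     nums.sort(reverse=True)
--     left = 0
--
--     for right in range(1, n):
--         if nums[left] > nums[right]:
--             left += 1
--
--     return left
-- ===== SOURCE B (Python) =====
-- from typing import List
--
-- def maximizeGreatness(nums: List[int]) -> int:
--     freq = {}
--     for x in nums:
--         freq[x] = freq.get(x, 0) + 1
--     return len(nums) - max(freq.values(), default=0)
-- ===== Notes on version B (the rewrite author's own statement) =====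
-- stated objective: simpler
-- what changed: Replaces sort-descending plus two-pointer matching with a single hash-count pass returning n minus the maximum element frequency (and B does not mutate nums, while A sorts it in place).
import Mathlib
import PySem

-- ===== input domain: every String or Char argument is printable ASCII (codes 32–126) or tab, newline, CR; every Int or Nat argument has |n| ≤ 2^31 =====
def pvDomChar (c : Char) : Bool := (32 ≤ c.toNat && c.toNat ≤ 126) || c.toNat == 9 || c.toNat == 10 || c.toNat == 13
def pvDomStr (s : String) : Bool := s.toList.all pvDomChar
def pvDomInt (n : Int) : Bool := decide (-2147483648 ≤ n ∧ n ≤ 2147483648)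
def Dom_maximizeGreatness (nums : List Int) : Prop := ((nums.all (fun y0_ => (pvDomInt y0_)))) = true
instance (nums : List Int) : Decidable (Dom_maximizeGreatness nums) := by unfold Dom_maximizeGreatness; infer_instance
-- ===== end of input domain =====

-- B replaces A's sort-descending + two-pointer scan by one hash-count pass returning n minus the
-- maximum element frequency; equivalence is about the RETURN value only: A sorts nums in place,
-- B does not mutate it.

-- ===== PORT A =====
def maximizeGreatness (nums : List Int) : Int :=
  let n : Int := (nums.length : Int)
  let s := PySem.List.sorted nums (fun x => x) true
  (PySem.List.pyRange 1 n).foldl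
    (fun left right =>
      if PySem.List.pyGetD s left 0 > PySem.List.pyGetD s right 0 then left + 1 else left) 0

-- ===== PORT B =====
def maximizeGreatness_alt (nums : List Int) : Int :=
  let freq : PySem.Dict Int Int :=
    nums.foldl (fun d x => d.modify x 0 (· + 1)) PySem.Dict.empty
  (nums.length : Int) - PySem.List.maxD freq.values (fun v => v) 0

-- ===== PRECONDITION & SPEC =====
def Spec_maximizeGreatness (nums : List Int) (out : Int) : Prop := out = maximizeGreatness_alt nums
instance (nums : List Int) (out : Int) : Decidable (Spec_maximizeGreatness nums out) := by unfold Spec_maximizeGreatness; infer_instance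

-- ===== CLAIM (what is proved, stated in full; the proofs are below) =====
def Claim_equal_maximizeGreatness : Prop := ∀ (nums : List Int), Dom_maximizeGreatness nums → Spec_maximizeGreatness nums (maximizeGreatness nums)

-- ===== LEMMAS AND PROOFS =====

-- maximum multiplicity of any value in p (0 for the empty list)
def mfreq (p : List Int) : Nat := p.toFinset.sup fun v => p.count v

theorem count_le_mfreq {p : List Int} {v : Int} (h : v ∈ p) : p.count v ≤ mfreq p := by
  unfold mfreq
  exact Finset.le_sup (f := fun v => p.count v) (List.mem_toFinset.2 h)

theorem one_le_mfreq {p : List Int} (h : p ≠ []) : 1 ≤ mfreq p := by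
  obtain ⟨x, t, rfl⟩ := List.exists_cons_of_ne_nil h
  calc 1 ≤ (x :: t).count x := by simp
    _ ≤ _ := count_le_mfreq (by simp)

theorem mfreq_le_length (p : List Int) : mfreq p ≤ p.length := by
  apply Finset.sup_le
  intro v _
  exact List.count_le_length

theorem mfreq_append (p : List Int) (a : Int) :
    mfreq (p ++ [a]) = max (p.count a + 1) (mfreq p) := by
  apply le_antisymm
  · apply Finset.sup_le
    intro v hv
    rw [List.mem_toFinset, List.mem_append] at hv
    by_cases hva : v = a
    · subst hva
      simp [List.count_append]
    · rcases hv with hv | hv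
      · have : (p ++ [a]).count v = p.count v := by
          simp [List.count_append, Ne.symm hva]
        rw [this]
        exact le_max_of_le_right (count_le_mfreq hv)
      · simp at hv; exact absurd hv hva
  · apply max_le
    · have ha : (p ++ [a]).count a = p.count a + 1 := by
        simp [List.count_append]
      calc p.count a + 1 = (p ++ [a]).count a := ha.symm
        _ ≤ mfreq (p ++ [a]) := count_le_mfreq (by simp)
    · apply Finset.sup_le
      intro v hv
      rw [List.mem_toFinset] at hv
      calc p.count v ≤ (p ++ [a]).count v := by simp [List.count_append]
        _ ≤ mfreq (p ++ [a]) := count_le_mfreq (by simp [hv])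

theorem mfreq_perm {p q : List Int} (h : p.Perm q) : mfreq p = mfreq q := by
  unfold mfreq
  rw [List.toFinset_eq_of_perm _ _ h]
  apply Finset.sup_congr rfl
  intro v _
  exact h.count_eq v

-- monotonicity of a descending-sorted list at indices
theorem sorted_desc_getElem_le {s : List Int} (hs : s.Pairwise (fun a b => b ≤ a))
    {i j : Nat} (hij : i ≤ j) (hj : j < s.length) : s[j] ≤ s[i] := by
  rcases Nat.lt_or_ge i j with h | h
  · exact (List.pairwise_iff_getElem.mp hs) i j (lt_of_lt_of_le h (le_of_lt hj)) hj h
  · have : i = j := le_antisymm hij h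
    subst this; exact le_refl _

-- the invariant of A's two-pointer loop on a descending-sorted list
theorem loopA_eq (s : List Int) (hs : s.Pairwise (fun a b => b ≤ a)) :
    ∀ r : Nat, 1 ≤ r → r ≤ s.length →
    (PySem.List.pyRange 1 (r : Int)).foldl
      (fun left right =>
        if PySem.List.pyGetD s left 0 > PySem.List.pyGetD s right 0 then left + 1 else left) 0
      = (r : Int) - (mfreq (s.take r) : Int) := by
  intro r hr1
  induction r, hr1 using Nat.le_induction with
  | base =>
    intro hlen
    obtain ⟨x, t, rfl⟩ : ∃ x t, s = x :: t := by
      cases s with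
      | nil => simp at hlen
      | cons x t => exact ⟨x, t, rfl⟩
    have : PySem.List.pyRange 1 ((1 : Nat) : Int) = [] := by decide
    rw [this]
    simp [mfreq, List.count_singleton]
  | succ r hr ih =>
    intro hlen
    have hrlen : r < s.length := by omega
    have hrle : r ≤ s.length := le_of_lt hrlen
    have htake_ne : s.take r ≠ [] := by
      apply List.ne_nil_of_length_pos
      rw [List.length_take]
      omega
    set m := mfreq (s.take r) with hm
    have hm1 : 1 ≤ m := one_le_mfreq htake_ne
    have hmr : m ≤ r := by
      have := mfreq_le_length (s.take r)
      simpa [List.length_take, Nat.min_eq_left hrle] using this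
    set lN : Nat := r - m with hlN
    have hlNr : lN < r := by omega
    have hlNlen : lN < s.length := lt_of_lt_of_le hlNr hrle
    -- peel the last iteration off the range
    have hrange : PySem.List.pyRange 1 (((r : Nat) + 1 : Nat) : Int)
        = PySem.List.pyRange 1 (r : Int) ++ [(r : Int)] := by
      push_cast
      exact PySem.List.pyRange_one_succ_right (by exact_mod_cast hr)
    rw [hrange, List.foldl_append, ih hrle]
    simp only [List.foldl_cons, List.foldl_nil]
    have hcastl : (r : Int) - (m : Int) = (lN : Int) := by omega
    rw [hcastl]
    have hgl : PySem.List.pyGetD s (lN : Int) 0 = s[lN] := by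
      rw [PySem.List.pyGetD_eq_getElem s 0 (by positivity) (by exact_mod_cast hlNlen)]
      simp
    have hgr : PySem.List.pyGetD s (r : Int) 0 = s[r] := by
      rw [PySem.List.pyGetD_eq_getElem s 0 (by positivity) (by exact_mod_cast hrlen)]
      simp
    have htake : s.take (r + 1) = s.take r ++ [s[r]] := by
      rw [List.take_add_one]
      congr
      rw [List.getElem?_eq_getElem hrlen]
      rfl
    rw [hgl, hgr]
    by_cases hcond : s[lN] > s[r]
    · -- matched: left moves; the max multiplicity does not grow
      rw [if_pos hcond]
      -- count of s[r] in s.take r is at most m - 1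
      have hsplit : s.take r = (s.take r).take (lN + 1) ++ (s.take r).drop (lN + 1) :=
        (List.take_append_drop _ _).symm
      have hc1 : ((s.take r).take (lN + 1)).count s[r] = 0 := by
        rw [List.count_eq_zero]
        intro hmem
        rw [List.take_take] at hmem
        have hmin : min (lN + 1) r = lN + 1 := Nat.min_eq_left (by omega)
        rw [hmin] at hmem
        obtain ⟨i, hi, hival⟩ := List.mem_iff_getElem.mp hmem
        rw [List.length_take] at hi
        have hilen : i < s.length := by
          have : i < lN + 1 := lt_of_lt_of_le hi (Nat.min_le_left _ _)
          omega
        rw [List.getElem_take] at hival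
        have hle1 : s[lN] ≤ s[i] :=
          sorted_desc_getElem_le hs (by
            have : i < lN + 1 := lt_of_lt_of_le hi (Nat.min_le_left _ _)
            omega) hlNlen
        rw [hival] at hle1
        exact absurd hle1 (not_le.mpr hcond)
      have hc2 : ((s.take r).drop (lN + 1)).count s[r] ≤ m - 1 := by
        calc ((s.take r).drop (lN + 1)).count s[r]
            ≤ ((s.take r).drop (lN + 1)).length := List.count_le_length
          _ = r - (lN + 1) := by
              rw [List.length_drop, List.length_take, Nat.min_eq_left hrle]
          _ = m - 1 := by omega
      have hcount : (s.take r).count s[r] + 1 ≤ m := by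
        conv_lhs => rw [hsplit]
        rw [List.count_append, hc1]
        omega
      have hmf : mfreq (s.take (r + 1)) = m := by
        rw [htake, mfreq_append]
        exact max_eq_right hcount
      rw [hmf]
      push_cast
      omega
    · -- tie: left stays; the max multiplicity grows by one
      rw [if_neg hcond]
      have heq : s[lN] = s[r] :=
        le_antisymm (not_lt.mp hcond) (sorted_desc_getElem_le hs (le_of_lt hlNr) hrlen)
      -- count of s[r] in s.take r is exactly m
      have hmem : s[r] ∈ s.take r := by
        rw [← heq]
        have hlt : lN < (s.take r).length := by
          rw [List.length_take]
          omega
        refine List.mem_iff_getElem.mpr ⟨lN, hlt, ?_⟩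
        simp [List.getElem_take]
      have hub : (s.take r).count s[r] ≤ m := count_le_mfreq hmem
      have hlb : m ≤ (s.take r).count s[r] := by
        have hdrop : ((s.take r).drop lN).count s[r] = r - lN := by
          have hlen : ((s.take r).drop lN).length = r - lN := by
            rw [List.length_drop, List.length_take, Nat.min_eq_left hrle]
          rw [← hlen]
          rw [List.count_eq_length]
          intro b hb
          obtain ⟨j, hj, hjval⟩ := List.mem_iff_getElem.mp hb
          rw [List.getElem_drop] at hjval
          rw [hlen] at hj
          have hidx : lN + j < s.length := by omega
          rw [List.getElem_take] at hjval
          have h1 : s[lN + j] ≤ s[lN] := sorted_desc_getElem_le hs (Nat.le_add_right _ _) hidx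
          have h2 : s[r] ≤ s[lN + j] := sorted_desc_getElem_le hs (by omega) hrlen
          rw [← hjval]
          rw [heq] at h1
          omega
        calc m = r - lN := by omega
          _ = ((s.take r).drop lN).count s[r] := hdrop.symm
          _ ≤ (s.take r).count s[r] := by
              conv_rhs => rw [← List.take_append_drop lN (s.take r)]
              rw [List.count_append]
              omega
      have hcount : (s.take r).count s[r] = m := le_antisymm hub hlb
      have hmf : mfreq (s.take (r + 1)) = m + 1 := by
        rw [htake, mfreq_append, hcount]
        exact max_eq_left (by omega)
      rw [hmf]
      push_cast
      omega

-- A computes n - mfreq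
theorem A_eq (nums : List Int) : maximizeGreatness nums = (nums.length : Int) - (mfreq nums : Int) := by
  cases hn : nums with
  | nil => decide
  | cons x t =>
    rw [← hn]
    have hlen : 1 ≤ nums.length := by rw [hn]; simp
    unfold maximizeGreatness
    set s := PySem.List.sorted nums (fun x => x) true with hsdef
    have hslen : s.length = nums.length := PySem.List.length_sorted nums (fun x => x) true
    have hs : s.Pairwise (fun a b => b ≤ a) := PySem.List.sorted_pairwise_rev nums (fun x => x)
    have := loopA_eq s hs nums.length (hlen) (le_of_eq hslen.symm)
    simp only at this ⊢
    rw [this]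
    have htk : s.take nums.length = s := by
      apply List.take_of_length_le
      omega
    rw [htk, mfreq_perm (PySem.List.sorted_perm nums (fun x => x) true)]

-- fold of max over mapped counts is the Finset sup
theorem foldl_max_cast (f : Int → Nat) :
    ∀ (kt : List Int) (a : Nat),
      kt.foldl (fun acc v => if acc < ((f v : Nat) : Int) then ((f v : Nat) : Int) else acc) ((a : Nat) : Int)
        = ((max a (kt.toFinset.sup f) : Nat) : Int) := by
  intro kt
  induction kt with
  | nil => intro a; simp
  | cons v vt ih =>
    intro a
    have hstep : (if ((a : Nat) : Int) < ((f v : Nat) : Int) then ((f v : Nat) : Int) else ((a : Nat) : Int))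
        = ((max a (f v) : Nat) : Int) := by
      split_ifs with h
      · have : a < f v := by exact_mod_cast h
        simp [Nat.max_eq_right (le_of_lt this)]
      · have : f v ≤ a := by
          have := not_lt.mp h
          exact_mod_cast this
        simp [Nat.max_eq_left this]
    rw [List.foldl_cons, hstep, ih (max a (f v))]
    congr 1
    rw [List.toFinset_cons, Finset.sup_insert]
    omega

-- B computes n - mfreq
theorem B_eq (nums : List Int) : maximizeGreatness_alt nums = (nums.length : Int) - (mfreq nums : Int) := by
  show (nums.length : Int) - PySem.List.maxD (nums.foldl (fun d x => d.modify x 0 (· + 1)) (PySem.Dict.empty : PySem.Dict Int Int)).values (fun v => v) 0 = _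
  rw [← PySem.Dict.counter_eq_foldl]
  rw [PySem.Dict.values_eq_map_keys _ (PySem.Dict.nodup_keys_counter nums) 0]
  rw [PySem.Dict.keys_counter]
  have hmapeq : (PySem.Set.ofList nums).map (fun k => (PySem.Dict.counter nums).getD k 0)
      = (PySem.Set.ofList nums).map (fun k => ((nums.count k : Nat) : Int)) := by
    apply List.map_congr_left
    intro k _
    exact PySem.Dict.getD_counter nums k
  rw [hmapeq]
  have hfin : (PySem.Set.ofList nums).toFinset = nums.toFinset := by
    ext v
    simp [List.mem_toFinset, PySem.Set.mem_ofList]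
  cases hks : (PySem.Set.ofList nums : List Int) with
  | nil =>
    have hnil : nums = [] := by
      cases hnums : nums with
      | nil => rfl
      | cons x t =>
        exfalso
        have : x ∈ PySem.Set.ofList nums := (PySem.Set.mem_ofList nums x).2 (by rw [hnums]; simp)
        rw [hks] at this
        simp at this
    subst hnil
    simp [PySem.List.maxD, PySem.List.max?, mfreq]
  | cons k kt =>
    rw [List.map_cons]
    unfold PySem.List.maxD
    rw [PySem.List.max?_id_cons]
    rw [Option.getD_some]
    have hfold : (kt.map (fun k => ((nums.count k : Nat) : Int))).foldl max ((nums.count k : Nat) : Int)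
        = kt.foldl (fun acc v => if acc < ((nums.count v : Nat) : Int) then ((nums.count v : Nat) : Int) else acc) ((nums.count k : Nat) : Int) := by
      rw [List.foldl_map]
      have hfn : (fun (acc : Int) (v : Int) => max acc ((nums.count v : Nat) : Int))
          = fun (acc : Int) (v : Int) => if acc < ((nums.count v : Nat) : Int) then ((nums.count v : Nat) : Int) else acc := by
        funext a b
        rw [max_def]
        split_ifs <;> omega
      rw [hfn]
    rw [hfold, foldl_max_cast]
    have : max (nums.count k) (kt.toFinset.sup fun v => nums.count v) = mfreq nums := by
      have h1 : (k :: kt).toFinset.sup (fun v => nums.count v) = mfreq nums := by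
        rw [← hks, hfin]
        rfl
      rw [← h1, List.toFinset_cons, Finset.sup_insert]
    rw [this]

-- ===== VERDICT (by name: the statement is the Claim_ definition above) =====
theorem maximizeGreatness_spec : Claim_equal_maximizeGreatness := by
  intro nums _
  unfold Spec_maximizeGreatness
  rw [A_eq, B_eq]
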